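-- pv_equiv track=rewrite | github.com/abcentech/InvestNairaResearch | scripts/ghost_sync.py | detect_type_and_ticker
-- ===== SOURCE A (Python) =====
-- TICKER_TAGS = {
--     "GTCO",
--     "ZENITHBANK",
--     "ACCESSCORP",
--     "MTNN",
--     "DANGCEM",
--     "SEPLAT",
--     "UBA",
--     "FBNH",
--     "BUACEMENT",
--     "AIRTELAFRI",
--     "NB",
--     "NESTLE",
--     "PRESCO",
--     "OKOMUOIL",
--     "STANBIC",
--     "WAPCO",
--     "TRANSCORP",
--     "BUAFOODS",
-- }
--
-- def detect_type_and_ticker(tags: list[dict]) -> tuple[str, str | None]: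
--     tag_slugs = [t.get("slug", "").lower() for t in tags]
--     tag_names = [t.get("name", "").upper() for t in tags]
--
--     post_type = "equity"
--     if any(t in tag_slugs for t in ("currency", "fx")):
--         post_type = "currency"
--     elif any(t in tag_slugs for t in ("commodity", "commodities")):
--         post_type = "commodity"
--     elif any(t in tag_slugs for t in ("crypto", "cryptocurrency")):
--         post_type = "crypto"
--     elif any(t in tag_slugs for t in ("real-estate", "realestate")):
--         post_type = "realestate"
--
--     ticker = next((name for name in tag_names if name in TICKER_TAGS), None)
--     return post_type, ticker
-- ===== SOURCE B (Python) =====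
-- TICKER_TAGS = {
--     "GTCO", "ZENITHBANK", "ACCESSCORP", "MTNN", "DANGCEM", "SEPLAT", "UBA",
--     "FBNH", "BUACEMENT", "AIRTELAFRI", "NB", "NESTLE", "PRESCO", "OKOMUOIL",
--     "STANBIC", "WAPCO", "TRANSCORP", "BUAFOODS",
-- }
--
-- # slug -> (priority rank, post type); lower rank wins regardless of tag order
-- _RANK = {
--     "currency": (0, "currency"),
--     "fx": (0, "currency"),
--     "commodity": (1, "commodity"),
--     "commodities": (1, "commodity"),
--     "crypto": (2, "crypto"),
--     "cryptocurrency": (2, "crypto"),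
--     "real-estate": (3, "realestate"),
--     "realestate": (3, "realestate"),
-- }
--
-- def detect_type_and_ticker(tags: list[dict]) -> tuple[str, str | None]:
--     best = 4
--     post_type = "equity"
--     ticker = None
--     for t in tags:
--         r = _RANK.get(t.get("slug", "").lower())
--         if r is not None and r[0] < best:
--             best, post_type = r
--         if ticker is None:
--             name = t.get("name", "").upper()
--             if name in TICKER_TAGS:
--                 ticker = name
--     return post_type, ticker
-- ===== Notes on version B (the rewrite author's own statement) =====
-- stated objective: alternative
-- what changed: Replaces A's two list comprehensions plus four separate membership scans over the slug list by a single fold over the tags that keeps the minimum-priority category from a static slug->(rank, post_type) dict and the first ticker name found in TICKER_TAGS.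
import Mathlib
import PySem

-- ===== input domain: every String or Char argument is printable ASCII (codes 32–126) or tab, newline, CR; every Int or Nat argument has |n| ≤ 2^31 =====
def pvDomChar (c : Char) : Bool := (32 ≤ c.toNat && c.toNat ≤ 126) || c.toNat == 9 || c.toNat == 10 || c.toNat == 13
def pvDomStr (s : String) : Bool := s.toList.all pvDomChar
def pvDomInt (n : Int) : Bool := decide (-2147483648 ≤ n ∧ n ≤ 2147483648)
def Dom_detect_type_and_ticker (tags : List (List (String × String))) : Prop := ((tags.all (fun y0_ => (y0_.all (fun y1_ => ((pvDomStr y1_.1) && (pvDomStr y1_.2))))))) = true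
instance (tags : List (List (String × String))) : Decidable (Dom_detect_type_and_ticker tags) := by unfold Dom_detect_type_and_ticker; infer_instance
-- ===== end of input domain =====

-- B replaces A's four membership scans over the slug list by a single fold that keeps the
-- minimum-priority category from a static rank dict and the first ticker name (objective: alternative one-pass decomposition).

-- module-level constant shared by both Pythons
def pvTickerSet : PySem.Set String :=
  PySem.Set.ofList ["GTCO", "ZENITHBANK", "ACCESSCORP", "MTNN", "DANGCEM", "SEPLAT", "UBA",
    "FBNH", "BUACEMENT", "AIRTELAFRI", "NB", "NESTLE", "PRESCO", "OKOMUOIL",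
    "STANBIC", "WAPCO", "TRANSCORP", "BUAFOODS"]

-- t.get(k, "")  on the tag association list
def pvGetStr (t : List (String × String)) (k : String) : String :=
  PySem.Dict.getD (PySem.Dict.mk t) k ""

-- t.get("slug", "").lower()  /  t.get("name", "").upper()
def pvSlugLow (t : List (String × String)) : String := PySem.Str.lower (pvGetStr t "slug")
def pvNameUp (t : List (String × String)) : String := PySem.Str.upper (pvGetStr t "name")

-- ===== PORT A =====
def detect_type_and_ticker (tags : List (List (String × String))) : String × Option String :=
  let tag_slugs := tags.map (fun t => pvSlugLow t)
  let tag_names := tags.map (fun t => pvNameUp t)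
  let post_type :=
    if (["currency", "fx"].any (fun s => tag_slugs.contains s)) then "currency"
    else if (["commodity", "commodities"].any (fun s => tag_slugs.contains s)) then "commodity"
    else if (["crypto", "cryptocurrency"].any (fun s => tag_slugs.contains s)) then "crypto"
    else if (["real-estate", "realestate"].any (fun s => tag_slugs.contains s)) then "realestate"
    else "equity"
  let ticker := tag_names.find? (fun name => PySem.Set.contains pvTickerSet name)
  (post_type, ticker)

-- ===== PORT B =====
-- the _RANK dict of Source B
def pvRankDict : PySem.Dict String (Nat × String) :=
  PySem.Dict.ofList [("currency", (0, "currency")), ("fx", (0, "currency")),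
    ("commodity", (1, "commodity")), ("commodities", (1, "commodity")),
    ("crypto", (2, "crypto")), ("cryptocurrency", (2, "crypto")),
    ("real-estate", (3, "realestate")), ("realestate", (3, "realestate"))]

-- the body of Source B's loop, on state (best, post_type, ticker)
def pvBStep (st : Nat × String × Option String) (t : List (String × String)) :
    Nat × String × Option String :=
  let bp : Nat × String :=
    match PySem.Dict.get? pvRankDict (pvSlugLow t) with
    | some (k, p) => if k < st.1 then (k, p) else (st.1, st.2.1)
    | none => (st.1, st.2.1)
  let tk : Option String :=
    match st.2.2 with
    | some v => some v
    | none =>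
      let name := pvNameUp t
      if PySem.Set.contains pvTickerSet name then some name else none
  (bp.1, bp.2, tk)

def detect_type_and_ticker_alt (tags : List (List (String × String))) : String × Option String :=
  let r := tags.foldl pvBStep (4, "equity", none)
  (r.2.1, r.2.2)

-- ===== PRECONDITION & SPEC =====
def Spec_detect_type_and_ticker (tags : List (List (String × String))) (out : String × Option String) : Prop := out = detect_type_and_ticker_alt tags
instance (tags : List (List (String × String))) (out : String × Option String) : Decidable (Spec_detect_type_and_ticker tags out) := by unfold Spec_detect_type_and_ticker; infer_instance

-- ===== CLAIM (what is proved, stated in full; the proofs are below) =====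
def Claim_equal_detect_type_and_ticker : Prop := ∀ (tags : List (List (String × String))), Dom_detect_type_and_ticker tags → Spec_detect_type_and_ticker tags (detect_type_and_ticker tags)

-- ===== LEMMAS AND PROOFS =====

-- rank number of a slug (4 = no category)
def pvRk (s : String) : Nat :=
  match PySem.Dict.get? pvRankDict s with
  | some (k, _) => k
  | none => 4

-- the post type that belongs to a rank
def pvNm (k : Nat) : String :=
  if k = 0 then "currency" else if k = 1 then "commodity" else if k = 2 then "crypto"
  else if k = 3 then "realestate" else "equity"

-- minimum rank over the tags
def pvM (tags : List (List (String × String))) : Nat :=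
  tags.foldr (fun t m => min (pvRk (pvSlugLow t)) m) 4

-- the two independent components of pvBStep
def pvStepPT (st : Nat × String) (t : List (String × String)) : Nat × String :=
  match PySem.Dict.get? pvRankDict (pvSlugLow t) with
  | some (k, p) => if k < st.1 then (k, p) else st
  | none => st

def pvStepTK (tk : Option String) (t : List (String × String)) : Option String :=
  match tk with
  | some v => some v
  | none =>
    let name := pvNameUp t
    if PySem.Set.contains pvTickerSet name then some name else none

theorem pvBStep_eq (st : Nat × String × Option String) (t : List (String × String)) :
    pvBStep st t = ((pvStepPT (st.1, st.2.1) t).1, (pvStepPT (st.1, st.2.1) t).2, pvStepTK st.2.2 t) := by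
  unfold pvBStep pvStepPT pvStepTK
  rcases st with ⟨b, p, tk⟩
  rcases h : PySem.Dict.get? pvRankDict (pvSlugLow t) with _ | ⟨k, q⟩ <;> simp

theorem pv_fold_split (l : List (List (String × String))) :
    ∀ (b : Nat) (p : String) (tk : Option String),
      l.foldl pvBStep (b, p, tk)
        = ((l.foldl pvStepPT (b, p)).1, (l.foldl pvStepPT (b, p)).2, l.foldl pvStepTK tk) := by
  induction l with
  | nil => intro b p tk; simp
  | cons t ts ih =>
    intro b p tk
    simp only [List.foldl_cons, pvBStep_eq]
    exact ih _ _ _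

theorem pvTK_some (l : List (List (String × String))) (v : String) :
    l.foldl pvStepTK (some v) = some v := by
  induction l with
  | nil => rfl
  | cons t ts ih => simpa [pvStepTK] using ih

theorem pvTK_none (l : List (List (String × String))) :
    l.foldl pvStepTK none
      = (l.map (fun t => pvNameUp t)).find? (fun name => PySem.Set.contains pvTickerSet name) := by
  induction l with
  | nil => rfl
  | cons t ts ih =>
    simp only [List.foldl_cons, List.map_cons, List.find?_cons]
    by_cases h : pvNameUp t ∈ pvTickerSet
    · simp [pvStepTK, h, pvTK_some]
    · simp [pvStepTK, h, ih]

-- pvRankDict as a literal items list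
theorem pvRankDict_eq :
    pvRankDict = PySem.Dict.mk [("currency", (0, "currency")), ("fx", (0, "currency")),
      ("commodity", (1, "commodity")), ("commodities", (1, "commodity")),
      ("crypto", (2, "crypto")), ("cryptocurrency", (2, "crypto")),
      ("real-estate", (3, "realestate")), ("realestate", (3, "realestate"))] := by
  decide

-- every hit of the rank dict carries pvNm of its rank, and a rank below 4
theorem pv_get_rank (s : String) :
    PySem.Dict.get? pvRankDict s = if pvRk s < 4 then some (pvRk s, pvNm (pvRk s)) else none := by
  unfold pvRk
  rw [pvRankDict_eq]
  simp only [PySem.Dict.get?_mk_cons]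
  split_ifs <;> simp_all [pvNm, PySem.Dict.get?]

theorem pvRk_le (s : String) : pvRk s ≤ 4 := by
  unfold pvRk
  rw [pvRankDict_eq]
  simp only [PySem.Dict.get?_mk_cons]
  split_ifs <;> simp [PySem.Dict.get?]

theorem pvM_le (l : List (List (String × String))) : pvM l ≤ 4 := by
  induction l with
  | nil => simp [pvM]
  | cons t ts ih => simp only [pvM, List.foldr_cons] at *; omega

theorem pvPT (l : List (List (String × String))) :
    ∀ b : Nat, b ≤ 4 → l.foldl pvStepPT (b, pvNm b) = (min b (pvM l), pvNm (min b (pvM l))) := by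
  induction l with
  | nil =>
    intro b hb
    have : min b (pvM []) = b := by simp [pvM]; omega
    simp [this]
  | cons t ts ih =>
    intro b hb
    have hM : pvM (t :: ts) = min (pvRk (pvSlugLow t)) (pvM ts) := rfl
    have hMts := pvM_le ts
    simp only [List.foldl_cons]
    have hstep : pvStepPT (b, pvNm b) t
        = (min (pvRk (pvSlugLow t)) b, pvNm (min (pvRk (pvSlugLow t)) b)) := by
      unfold pvStepPT
      rw [pv_get_rank (pvSlugLow t)]
      by_cases h4 : pvRk (pvSlugLow t) < 4
      · simp only [h4, if_pos]
        by_cases hlt : pvRk (pvSlugLow t) < b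
        · have : min (pvRk (pvSlugLow t)) b = pvRk (pvSlugLow t) := by omega
          simp [hlt, this]
        · have : min (pvRk (pvSlugLow t)) b = b := by omega
          simp [hlt, this]
      · have h44 : pvRk (pvSlugLow t) = 4 := by have := pvRk_le (pvSlugLow t); omega
        have : min (pvRk (pvSlugLow t)) b = b := by omega
        simp [h4, this]
    rw [hstep, ih (min (pvRk (pvSlugLow t)) b) (by omega)]
    have : min (min (pvRk (pvSlugLow t)) b) (pvM ts) = min b (pvM (t :: ts)) := by
      rw [hM]; omega
    rw [this]

-- slug membership of a category pair equals "rank = i" over the tags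
theorem pv_rk_val (s : String) (i : Nat) (hi : i < 4) :
    (pvRk s = i) ↔ (i = 0 ∧ (s = "currency" ∨ s = "fx"))
      ∨ (i = 1 ∧ (s = "commodity" ∨ s = "commodities"))
      ∨ (i = 2 ∧ (s = "crypto" ∨ s = "cryptocurrency"))
      ∨ (i = 3 ∧ (s = "real-estate" ∨ s = "realestate")) := by
  unfold pvRk
  rw [pvRankDict_eq]
  simp only [PySem.Dict.get?_mk_cons]
  split_ifs with h1 h2 h3 h4 h5 h6 h7 h8
  · rw [show s = "currency" from (beq_iff_eq.mp h1).symm]; simp; omega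
  · rw [show s = "fx" from (beq_iff_eq.mp h2).symm]; simp; omega
  · rw [show s = "commodity" from (beq_iff_eq.mp h3).symm]; simp; omega
  · rw [show s = "commodities" from (beq_iff_eq.mp h4).symm]; simp; omega
  · rw [show s = "crypto" from (beq_iff_eq.mp h5).symm]; simp; omega
  · rw [show s = "cryptocurrency" from (beq_iff_eq.mp h6).symm]; simp; omega
  · rw [show s = "real-estate" from (beq_iff_eq.mp h7).symm]; simp; omega
  · rw [show s = "realestate" from (beq_iff_eq.mp h8).symm]; simp; omega
  · simp only [PySem.Dict.get?, List.find?_nil, Option.map_none]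
    constructor
    · intro h; omega
    · rintro (⟨_, h | h⟩ | ⟨_, h | h⟩ | ⟨_, h | h⟩ | ⟨_, h | h⟩) <;> subst h <;> simp_all

theorem pv_any_contains (tags : List (List (String × String))) (i : Nat) (x y : String)
    (hxy : ∀ s, pvRk s = i ↔ (s = x ∨ s = y)) :
    (tags.any (fun t => pvRk (pvSlugLow t) == i))
      = (((tags.map (fun t => pvSlugLow t)).contains x) || ((tags.map (fun t => pvSlugLow t)).contains y)) := by
  rw [Bool.eq_iff_iff]
  simp only [List.any_eq_true, Bool.or_eq_true, List.contains_iff_mem, List.mem_map, beq_iff_eq]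
  constructor
  · rintro ⟨t, ht, hr⟩
    rcases (hxy _).1 hr with h | h
    · exact Or.inl ⟨t, ht, h⟩
    · exact Or.inr ⟨t, ht, h⟩
  · rintro (⟨t, ht, h⟩ | ⟨t, ht, h⟩) <;>
      exact ⟨t, ht, (hxy _).2 (by tauto)⟩

-- the minimum rank written as A's elif chain over the any-tests
theorem pvM_chain (tags : List (List (String × String))) :
    pvM tags = (if tags.any (fun t => pvRk (pvSlugLow t) == 0) then 0
      else if tags.any (fun t => pvRk (pvSlugLow t) == 1) then 1
      else if tags.any (fun t => pvRk (pvSlugLow t) == 2) then 2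
      else if tags.any (fun t => pvRk (pvSlugLow t) == 3) then 3
      else 4) := by
  induction tags with
  | nil => simp [pvM]
  | cons t ts ih =>
    have hM : pvM (t :: ts) = min (pvRk (pvSlugLow t)) (pvM ts) := rfl
    have hr := pvRk_le (pvSlugLow t)
    rw [hM, ih]
    simp only [List.any_cons]
    have h5 : pvRk (pvSlugLow t) = 0 ∨ pvRk (pvSlugLow t) = 1 ∨ pvRk (pvSlugLow t) = 2
        ∨ pvRk (pvSlugLow t) = 3 ∨ pvRk (pvSlugLow t) = 4 := by omega
    rcases h5 with h | h | h | h | h <;> simp only [h] <;> simp <;> split_ifs <;> omega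

-- ===== VERDICT (by name: the statement is the Claim_ definition above) =====
theorem detect_type_and_ticker_spec : Claim_equal_detect_type_and_ticker := by
  intro tags _
  show detect_type_and_ticker tags = detect_type_and_ticker_alt tags
  unfold detect_type_and_ticker detect_type_and_ticker_alt
  rw [pv_fold_split]
  have h4 : pvNm 4 = "equity" := rfl
  have hPT := pvPT tags 4 (by omega)
  rw [h4] at hPT
  have hmin : min 4 (pvM tags) = pvM tags := by have := pvM_le tags; omega
  rw [hmin] at hPT
  rw [hPT, pvTK_none]
  have h0 := pv_any_contains tags 0 "currency" "fx"
    (fun s => by rw [pv_rk_val s 0 (by omega)]; simp)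
  have h1 := pv_any_contains tags 1 "commodity" "commodities"
    (fun s => by rw [pv_rk_val s 1 (by omega)]; simp)
  have h2 := pv_any_contains tags 2 "crypto" "cryptocurrency"
    (fun s => by rw [pv_rk_val s 2 (by omega)]; simp)
  have h3 := pv_any_contains tags 3 "real-estate" "realestate"
    (fun s => by rw [pv_rk_val s 3 (by omega)]; simp)
  simp only [List.any_cons, List.any_nil, Bool.or_false]
  rw [← h0, ← h1, ← h2, ← h3, pvM_chain tags]
  split_ifs <;> simp_all [pvNm]
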